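-- pv_equiv track=rewrite | github.com/cptlemons/Advent-of-Code | 2017/Day1/d1.py | part1
-- ===== SOURCE A (Python) =====
-- def part1(nums):
--     total = 0
--
--     for i in range(len(nums)-1):
--         if nums[i] == nums[i+1]:
--             total += nums[i]
--
--     if nums[0] == nums[-1]:
--         total += nums[0]
--
--     return total
-- ===== SOURCE B (Python) =====
-- def part1(nums):
--     # Run-length encode the list, then use the closed form: a run of k equal
--     # values v contains k-1 equal adjacent pairs, contributing v*(k-1); the
--     # circular wrap pair is checked once on the first/last run values.
--     runs = []
--     for x in nums:
--         if runs and runs[-1][0] == x: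
--             runs[-1] = (runs[-1][0], runs[-1][1] + 1)
--         else:
--             runs.append((x, 1))
--     total = sum(v * (k - 1) for v, k in runs)
--     if runs[0][0] == runs[-1][0]:
--         total += runs[0][0]
--     return total
-- ===== Notes on version B (the rewrite author's own statement) =====
-- stated objective: alternative
-- what changed: Run-length encodes the list and uses the closed form v*(k-1) per run (a run of k equal values has k-1 equal adjacent pairs) plus one wrap check on the first/last run values, instead of A's element-by-element index loop comparing nums[i] with nums[i+1].
import Mathlib
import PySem

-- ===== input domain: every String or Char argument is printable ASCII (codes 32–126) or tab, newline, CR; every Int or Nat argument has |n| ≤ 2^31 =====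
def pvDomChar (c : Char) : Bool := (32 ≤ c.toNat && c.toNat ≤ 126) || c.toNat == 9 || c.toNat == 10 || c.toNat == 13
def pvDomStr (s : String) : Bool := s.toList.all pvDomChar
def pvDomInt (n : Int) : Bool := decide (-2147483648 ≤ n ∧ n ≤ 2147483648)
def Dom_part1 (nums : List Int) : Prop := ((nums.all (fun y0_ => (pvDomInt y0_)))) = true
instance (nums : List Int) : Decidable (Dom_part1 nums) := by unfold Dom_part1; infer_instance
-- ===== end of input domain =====

-- B run-length encodes the list and sums v*(k-1) per run plus one wrap check on the
-- first/last run values, instead of A's index loop; same cost, different algorithm.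
-- Both raise IndexError on [] (outside Pre_).

-- ===== PORT A =====
def part1 (nums : List Int) : Int :=
  let total : Int :=
    (PySem.List.pyRange 0 ((nums.length : Int) - 1) 1).foldl
      (fun total i =>
        if PySem.List.pyGetD nums i 0 == PySem.List.pyGetD nums (i + 1) 0 then
          total + PySem.List.pyGetD nums i 0
        else total) 0
  if PySem.List.pyGetD nums 0 0 == PySem.List.pyGetD nums (-1) 0 then
    total + PySem.List.pyGetD nums 0 0
  else total

-- ===== PORT B =====
-- B's loop body: extend the last run if it has the same value, else start a new run.
def pvRunStep (runs : List (Int × Int)) (x : Int) : List (Int × Int) :=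
  match runs.getLast? with
  | some vk =>
      if vk.1 == x then runs.dropLast ++ [(vk.1, vk.2 + 1)] else runs ++ [(x, 1)]
  | none => runs ++ [(x, 1)]

def part1_alt (nums : List Int) : Int :=
  let runs := nums.foldl pvRunStep []
  let total := (runs.map (fun vk => vk.1 * (vk.2 - 1))).sum
  if (PySem.List.pyGetD runs 0 (0, 0)).1 == (PySem.List.pyGetD runs (-1) (0, 0)).1 then
    total + (PySem.List.pyGetD runs 0 (0, 0)).1
  else total

-- ===== PRECONDITION & SPEC =====
-- Pre_ excludes exactly the empty list, on which A (nums[0]) raises IndexError.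
def Pre_part1 (nums : List Int) : Prop := nums ≠ []
instance (nums : List Int) : Decidable (Pre_part1 nums) := by unfold Pre_part1; infer_instance
def pvWitness_part1 : List Int := [1, 1, 2]

def Spec_part1 (nums : List Int) (out : Int) : Prop := out = part1_alt nums
instance (nums : List Int) (out : Int) : Decidable (Spec_part1 nums out) := by unfold Spec_part1; infer_instance

-- ===== CLAIM =====
def Claim_equal_part1 : Prop := ∀ (nums : List Int), Dom_part1 nums → Pre_part1 nums → Spec_part1 nums (part1 nums)

-- ===== LEMMAS AND PROOFS =====

-- the sum of adjacent equal pairs of a list (the value A's loop computes)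
def pvAdj : List Int → Int
  | a :: b :: t => (if a = b then a else 0) + pvAdj (b :: t)
  | _ => 0

-- A's loop body, abstracted over the pair of compared values.
def pvStep (s : Int) (ab : Int × Int) : Int := if ab.1 == ab.2 then s + ab.1 else s

-- per-run contribution
def pvF (vk : Int × Int) : Int := vk.1 * (vk.2 - 1)

-- ----- A side: the indexed loop computes pvAdj -----

lemma loop_eq_zip_tail (l : List Int) :
    (PySem.List.pyRange 0 ((l.length : Int) - 1) 1).foldl
      (fun total i =>
        if PySem.List.pyGetD l i 0 == PySem.List.pyGetD l (i + 1) 0 then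
          total + PySem.List.pyGetD l i 0
        else total) 0
    = (l.zip l.tail).foldl pvStep 0 := by
  have hmap : (PySem.List.pyRange 0 ((l.length : Int) - 1) 1).map
      (fun i => (PySem.List.pyGetD l i 0, PySem.List.pyGetD l (i + 1) 0))
      = l.zip l.tail := by
    apply List.ext_getElem
    · simp [PySem.List.length_pyRange_one, List.length_zip, List.length_tail]
    · intro k h1 h2
      have hk : k + 1 < l.length := by
        simp [PySem.List.length_pyRange_one] at h1; omega
      simp only [List.getElem_map, PySem.List.getElem_pyRange_one, zero_add]
      have e1 : ((k : Int) + 1) = ((k + 1 : Nat) : Int) := by push_cast; ring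
      rw [e1, PySem.List.pyGetD_natCast, PySem.List.pyGetD_natCast,
          List.getD_eq_getElem _ _ (by omega), List.getD_eq_getElem _ _ (by omega)]
      simp [List.getElem_zip, List.getElem_tail]
  rw [← hmap, List.foldl_map]
  rfl

lemma zip_tail_fold_eq_pvAdj : ∀ (l : List Int) (s : Int),
    (l.zip l.tail).foldl pvStep s = s + pvAdj l := by
  intro l
  induction l with
  | nil => intro s; simp [pvAdj]
  | cons a t ih =>
    intro s
    cases t with
    | nil => simp [pvAdj]
    | cons b u =>
      have := ih (pvStep s (a, b))
      simp only [List.tail_cons] at this ⊢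
      rw [List.zip_cons_cons, List.foldl_cons, this]
      by_cases h : a = b <;> simp [pvStep, pvAdj, h] <;> ring

-- ----- B side: invariant of the run-building fold -----

lemma runs_inv : ∀ (l : List Int) (acc : List (Int × Int)) (v k : Int),
    acc.getLast? = some (v, k) →
    (l.foldl pvRunStep acc) ≠ [] ∧
    ((l.foldl pvRunStep acc).map pvF).sum = (acc.map pvF).sum + pvAdj (v :: l) ∧
    ((l.foldl pvRunStep acc).getLast?).map Prod.fst = some ((v :: l).getLast (by simp)) ∧
    ((l.foldl pvRunStep acc).head?).map Prod.fst = (acc.head?).map Prod.fst := by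
  intro l
  induction l with
  | nil =>
    intro acc v k h
    refine ⟨fun hn => by subst hn; simp at h, by simp [show pvAdj [v] = 0 from rfl], ?_, rfl⟩
    rw [List.foldl_nil, h]
    rfl
  | cons x t ih =>
    intro acc v k h
    have hacc : acc ≠ [] := fun hn => by simp [hn] at h
    have hsplit : acc.dropLast ++ [(v, k)] = acc := by
      have hg : acc.getLast hacc = (v, k) :=
        Option.some_inj.mp ((List.getLast?_eq_getLast hacc).symm.trans h)
      have h2 := List.dropLast_append_getLast hacc
      rwa [hg] at h2
    simp only [List.foldl_cons]
    by_cases hv : v = x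
    · -- extend the last run
      have hstep : pvRunStep acc x = acc.dropLast ++ [(v, k + 1)] := by
        simp [pvRunStep, h, hv]
      have hlast : (pvRunStep acc x).getLast? = some (v, k + 1) := by
        simp [hstep]
      obtain ⟨h1, h2, h3, h4⟩ := ih (pvRunStep acc x) v (k + 1) hlast
      refine ⟨h1, ?_, ?_, ?_⟩
      · rw [h2, hstep]
        conv_rhs => rw [← hsplit]
        subst hv
        simp [pvF, List.map_append, List.sum_append, pvAdj]
        ring
      · rw [h3]
        subst hv
        simp [List.getLast_cons]
      · rw [h4, hstep]
        conv_rhs => rw [← hsplit]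
        cases hd : acc.dropLast with
        | nil => simp
        | cons p q => simp
    · -- start a new run
      have hstep : pvRunStep acc x = acc ++ [(x, 1)] := by
        simp [pvRunStep, h, hv]
      have hlast : (pvRunStep acc x).getLast? = some (x, 1) := by
        simp [hstep]
      obtain ⟨h1, h2, h3, h4⟩ := ih (pvRunStep acc x) x 1 hlast
      refine ⟨h1, ?_, ?_, ?_⟩
      · rw [h2, hstep]
        simp [pvF, List.map_append, List.sum_append, pvAdj, hv]
      · rw [h3]
        simp [List.getLast_cons]
      · rw [h4, hstep]
        cases acc with
        | nil => exact absurd rfl hacc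
        | cons p q => simp

-- the facts we need about the runs of a nonempty list
lemma runs_facts (x : Int) (t : List Int) :
    List.foldl pvRunStep [] (x :: t) ≠ [] ∧
    ((List.foldl pvRunStep [] (x :: t)).map pvF).sum = pvAdj (x :: t) ∧
    ((List.foldl pvRunStep [] (x :: t)).getLast?).map Prod.fst
      = some ((x :: t).getLast (by simp)) ∧
    ((List.foldl pvRunStep [] (x :: t)).head?).map Prod.fst = some x := by
  have h0 : pvRunStep [] x = [(x, 1)] := by simp [pvRunStep]
  have := runs_inv t [(x, 1)] x 1 (by simp)
  simpa [List.foldl_cons, h0, pvF] using this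

-- ===== VERDICT =====
theorem part1_spec : Claim_equal_part1 := by
  intro nums _ hpre
  unfold Spec_part1 part1 part1_alt
  cases nums with
  | nil => exact absurd rfl hpre
  | cons x t =>
    obtain ⟨hne, hsum, hlast, hhead⟩ := runs_facts x t
    have hheadv : (PySem.List.pyGetD (List.foldl pvRunStep [] (x :: t)) 0
        ((0 : Int), (0 : Int))).1 = x := by
      cases hruns : List.foldl pvRunStep [] (x :: t) with
      | nil => exact absurd hruns hne
      | cons p q =>
        rw [hruns] at hhead
        simp only [List.head?_cons, Option.map_some, Option.some_inj] at hhead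
        simp [PySem.List.pyGetD_zero_cons, hhead]
    have hlastv : (PySem.List.pyGetD (List.foldl pvRunStep [] (x :: t)) (-1)
        ((0 : Int), (0 : Int))).1 = (x :: t).getLast (by simp) := by
      rw [PySem.List.pyGetD_neg_one _ _ hne, ← Option.some_inj, ← hlast,
          List.getLast?_eq_getLast hne]
      rfl
    have hA0 : PySem.List.pyGetD (x :: t) 0 0 = x := PySem.List.pyGetD_zero_cons ..
    have hA1 : PySem.List.pyGetD (x :: t) (-1) 0 = (x :: t).getLast (by simp) :=
      PySem.List.pyGetD_neg_one _ _ (by simp)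
    have hsum' : (((List.foldl pvRunStep [] (x :: t)).map
        (fun vk => vk.1 * (vk.2 - 1))).sum) = pvAdj (x :: t) := by
      simpa [pvF] using hsum
    simp only [loop_eq_zip_tail, zip_tail_fold_eq_pvAdj, zero_add]
    rw [hheadv, hlastv, hA0, hA1, hsum']
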